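-- pv_equiv track=rewrite | github.com/etherion-1337/LeetCode | easy/1652_defuse_the_bomb/solution.py | decrypt
-- ===== SOURCE A (Python) =====
-- from typing import List
--
-- def decrypt(code: List[int], k: int) -> List[int]:
--     N = len(code)
--     ans = [0] * N
--
--     l = 0
--     curr_sum = 0
--     for r in range(N + abs(k)):
--         curr_sum += code[r % N]
--
--         if r - l + 1 > abs(k):
--             curr_sum -= code[l % N]
--             l = (l + 1) % N
--
--         if r - l + 1 == abs(k):
--             if k > 0:
--                 ans[(l - 1) % N] = curr_sum
--             elif k < 0:
--                 ans[(r + 1) % N] = curr_sum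
--
--     return ans
-- ===== SOURCE B (Python) =====
-- def decrypt(code, k):
--     N = len(code)
--     if k > 0:
--         return [sum(code[(i + j) % N] for j in range(1, k + 1)) for i in range(N)]
--     if k < 0:
--         return [sum(code[(i + j) % N] for j in range(k, 0)) for i in range(N)]
--     return [0] * N
-- ===== Notes on version B (the rewrite author's own statement) =====
-- stated objective: simpler
-- what changed: Replaced the stateful circular sliding-window pass (running sum, two moving pointers, in-place writes at modular offsets) by a direct per-index comprehension that sums each window of |k| neighbours independently with modular indexing.
import Mathlib
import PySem

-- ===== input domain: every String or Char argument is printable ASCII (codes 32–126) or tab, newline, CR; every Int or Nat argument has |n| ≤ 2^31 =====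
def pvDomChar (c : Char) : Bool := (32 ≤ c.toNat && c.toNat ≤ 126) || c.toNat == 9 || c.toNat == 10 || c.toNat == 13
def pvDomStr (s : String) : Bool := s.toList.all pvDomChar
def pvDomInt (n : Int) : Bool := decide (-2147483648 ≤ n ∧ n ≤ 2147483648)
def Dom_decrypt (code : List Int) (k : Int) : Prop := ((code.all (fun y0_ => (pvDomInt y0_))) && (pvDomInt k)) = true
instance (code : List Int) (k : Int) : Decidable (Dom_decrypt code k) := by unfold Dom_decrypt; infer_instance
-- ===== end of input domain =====

-- B replaces A's stateful circular sliding-window pass by a direct per-index sum of each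
-- window of |k| neighbours with modular indexing (simpler; no speed claim).


-- ===== PORT A =====
-- A-side helper: the body of A's for-loop over state (ans, l, curr_sum).  Every list access
-- is at an index `x % N` with 0 < N under Pre_, so pyGetD-with-default-0 and set/.toNat are
-- exact (the index is in range and nonnegative there).
def stepA (code : List Int) (k : Int) (st : List Int × Int × Int) (r : Int) :
    List Int × Int × Int :=
  let N : Int := (code.length : Int)
  -- curr_sum += code[r % N]
  let s1 : Int := st.2.2 + PySem.List.pyGetD code (PySem.Int.mod r N) 0
  -- if r - l + 1 > abs(k): curr_sum -= code[l % N]; l = (l + 1) % N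
  let l1 : Int := if r - st.2.1 + 1 > (k.natAbs : Int) then PySem.Int.mod (st.2.1 + 1) N else st.2.1
  let s2 : Int :=
    if r - st.2.1 + 1 > (k.natAbs : Int) then s1 - PySem.List.pyGetD code (PySem.Int.mod st.2.1 N) 0
    else s1
  -- if r - l + 1 == abs(k): ans[(l-1) % N] = curr_sum  (k>0)  /  ans[(r+1) % N] = curr_sum  (k<0)
  let ans1 : List Int :=
    if r - l1 + 1 = (k.natAbs : Int) then
      if 0 < k then st.1.set (PySem.Int.mod (l1 - 1) N).toNat s2
      else if k < 0 then st.1.set (PySem.Int.mod (r + 1) N).toNat s2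
      else st.1
    else st.1
  (ans1, l1, s2)

def decrypt (code : List Int) (k : Int) : List Int :=
  ((PySem.List.pyRange 0 ((code.length : Int) + (k.natAbs : Int)) 1).foldl
    (stepA code k) (List.replicate code.length 0, 0, 0)).1

-- ===== PORT B =====
def decrypt_alt (code : List Int) (k : Int) : List Int :=
  if 0 < k then
    (List.range code.length).map (fun i : Nat =>
      (PySem.List.pyRange 1 (k + 1) 1).foldl
        (fun acc j => acc + PySem.List.pyGetD code (PySem.Int.mod ((i : Int) + j) (code.length : Int)) 0) 0)
  else if k < 0 then
    (List.range code.length).map (fun i : Nat =>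
      (PySem.List.pyRange k 0 1).foldl
        (fun acc j => acc + PySem.List.pyGetD code (PySem.Int.mod ((i : Int) + j) (code.length : Int)) 0) 0)
  else
    List.replicate code.length 0

-- ===== PRECONDITION & SPEC =====
-- Pre_ excludes only code = [] with k ≠ 0: there A's `code[r % N]` divides by N = 0 and raises
-- ZeroDivisionError (A returns no value).
def Pre_decrypt (code : List Int) (k : Int) : Prop := code ≠ [] ∨ k = 0
instance (code : List Int) (k : Int) : Decidable (Pre_decrypt code k) := by
  unfold Pre_decrypt; infer_instance
def pvWitness_decrypt : List Int × Int := ([5, 7, 1, 4], 3)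

def Spec_decrypt (code : List Int) (k : Int) (out : List Int) : Prop := out = decrypt_alt code k
instance (code : List Int) (k : Int) (out : List Int) : Decidable (Spec_decrypt code k out) := by
  unfold Spec_decrypt; infer_instance

-- ===== CLAIM (what is proved, stated in full; the proofs are below) =====
def Claim_equal_decrypt : Prop := ∀ (code : List Int) (k : Int),
  Dom_decrypt code k → Pre_decrypt code k → Spec_decrypt code k (decrypt code k)

-- ===== LEMMAS AND PROOFS =====

-- `code[u % N]` as a function of the unreduced index u
def cIdx (code : List Int) (u : Int) : Int :=
  PySem.List.pyGetD code (PySem.Int.mod u (code.length : Int)) 0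

-- sum of code[u % N] over u ∈ [a, b)
def Ssum (code : List Int) (a b : Int) : Int :=
  ((PySem.List.pyRange a b 1).map (cIdx code)).sum

-- the (unique) loop iteration r at which A writes ans[i]
def wIter (code : List Int) (k : Int) (i : Int) : Int :=
  if 0 < k then (if i = (code.length : Int) - 1 then (k.natAbs : Int) - 1 else (k.natAbs : Int) + i)
  else (k.natAbs : Int) - 1 + PySem.Int.mod (i - (k.natAbs : Int)) (code.length : Int)

-- B's value at index i, phrased through cIdx
def Vval (code : List Int) (k : Int) (i : Int) : Int :=
  if 0 < k then ((PySem.List.pyRange 1 (k + 1) 1).map (fun j => cIdx code (i + j))).sum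
  else ((PySem.List.pyRange k 0 1).map (fun j => cIdx code (i + j))).sum

-- A's ans list after t iterations
def ansSpec (code : List Int) (k : Int) (t : Int) : List Int :=
  (List.range code.length).map (fun i : Nat => if wIter code k (i : Int) < t then Vval code k (i : Int) else 0)


-- ---- arithmetic helpers ----
lemma mod_small {x N : Int} (h0 : 0 ≤ x) (h1 : x < N) : PySem.Int.mod x N = x := by
  rw [PySem.Int.mod_eq_emod_of_pos (by omega)]; exact Int.emod_eq_of_lt h0 h1

lemma mod_neg_one {N : Int} (hN : 0 < N) : PySem.Int.mod (-1) N = N - 1 := by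
  rw [PySem.Int.mod_eq_emod_of_pos hN]
  conv_lhs => rw [show (-1 : Int) = N - 1 - N by ring]
  rw [Int.sub_emod_right]; exact Int.emod_eq_of_lt (by omega) (by omega)

lemma mod_bounds {N : Int} (x : Int) (hN : 0 < N) :
    0 ≤ PySem.Int.mod x N ∧ PySem.Int.mod x N < N :=
  ⟨PySem.Int.mod_nonneg x hN, PySem.Int.mod_lt x hN⟩

lemma eq_of_small_dvd {i i' N : Int} (h : N ∣ (i - i')) (h1 : 0 ≤ i) (h2 : i < N)
    (h3 : 0 ≤ i') (h4 : i' < N) : i = i' := by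
  rcases h with ⟨c, hc⟩
  rcases lt_trichotomy c 0 with h | h | h
  · nlinarith
  · simp [h] at hc; omega
  · nlinarith

-- ---- cIdx / Ssum facts (N = code.length > 0 throughout) ----
lemma cIdx_period (code : List Int) (u : Int) (hN : 0 < (code.length : Int)) :
    cIdx code (u + (code.length : Int)) = cIdx code u := by
  unfold cIdx
  rw [PySem.Int.mod_eq_emod_of_pos hN, PySem.Int.mod_eq_emod_of_pos hN, Int.add_emod_right]

lemma cIdx_period_mul (code : List Int) (u : Int) (q : Nat) (hN : 0 < (code.length : Int)) :
    cIdx code (u + (q : Int) * (code.length : Int)) = cIdx code u := by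
  induction q with
  | zero => simp
  | succ p ih =>
      have : u + ((p : Int) + 1) * (code.length : Int)
           = (u + (p : Int) * (code.length : Int)) + (code.length : Int) := by ring
      push_cast
      rw [this, cIdx_period _ _ hN]
      push_cast at ih
      exact ih

lemma Ssum_range (code : List Int) (a b : Int) :
    Ssum code a b = ((List.range (b - a).toNat).map (fun kk : Nat => cIdx code (a + (kk : Int)))).sum := by
  unfold Ssum
  rw [PySem.List.pyRange_one, List.map_map]
  rfl

lemma Ssum_nilr (code : List Int) {a b : Int} (h : b ≤ a) : Ssum code a b = 0 := by
  unfold Ssum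
  rw [PySem.List.pyRange_one_eq_nil h]
  rfl

lemma Ssum_succ_right (code : List Int) {a b : Int} (h : a ≤ b) :
    Ssum code a (b + 1) = Ssum code a b + cIdx code b := by
  unfold Ssum
  rw [PySem.List.pyRange_one_succ_right h]
  simp

lemma Ssum_cons (code : List Int) {a b : Int} (h : a < b) :
    Ssum code a b = cIdx code a + Ssum code (a + 1) b := by
  unfold Ssum
  rw [PySem.List.pyRange_one_cons h]
  simp

lemma Ssum_shift (code : List Int) (a b : Int) (q : Nat) (hN : 0 < (code.length : Int)) :
    Ssum code (a + (q : Int) * (code.length : Int)) (b + (q : Int) * (code.length : Int))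
      = Ssum code a b := by
  rw [Ssum_range, Ssum_range]
  have hlen : (b + (q : Int) * (code.length : Int) - (a + (q : Int) * (code.length : Int))).toNat
      = (b - a).toNat := by omega
  rw [hlen]
  congr 1
  apply List.map_congr_left
  intro kk _
  have : a + (q : Int) * (code.length : Int) + (kk : Int)
       = (a + (kk : Int)) + (q : Int) * (code.length : Int) := by ring
  rw [this, cIdx_period_mul _ _ _ hN]

-- ---- Vval in Ssum form ----
lemma Vval_pos (code : List Int) {k : Int} (hk : 0 < k) (i : Int) :
    Vval code k i = Ssum code (i + 1) (i + 1 + (k.natAbs : Int)) := by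
  have hcast : (k.natAbs : Int) = k := Int.natAbs_of_nonneg (le_of_lt hk)
  unfold Vval
  rw [if_pos hk, Ssum_range, PySem.List.pyRange_one, List.map_map]
  have hlen : (i + 1 + (k.natAbs : Int) - (i + 1)).toNat = (k + 1 - 1).toNat := by omega
  rw [hlen]
  congr 1
  apply List.map_congr_left
  intro kk _
  show cIdx code (i + (1 + (kk : Int))) = cIdx code (i + 1 + (kk : Int))
  ring_nf

lemma Vval_neg (code : List Int) {k : Int} (hk : k < 0) (i : Int) :
    Vval code k i = Ssum code (i - (k.natAbs : Int)) i := by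
  have hcast : (k.natAbs : Int) = -k := by omega
  unfold Vval
  rw [if_neg (by omega), Ssum_range, PySem.List.pyRange_one, List.map_map]
  have hlen : (i - (i - (k.natAbs : Int))).toNat = (0 - k).toNat := by omega
  rw [hlen]
  congr 1
  apply List.map_congr_left
  intro kk _
  show cIdx code (i + (k + (kk : Int))) = cIdx code (i - (k.natAbs : Int) + (kk : Int))
  congr 1
  omega

-- ---- wIter facts ----
lemma wIter_bounds (code : List Int) {k : Int} (hN : 0 < (code.length : Int))
    {i : Int} (h0 : 0 ≤ i) (h1 : i < (code.length : Int)) :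
    (k.natAbs : Int) - 1 ≤ wIter code k i ∧
      wIter code k i ≤ (code.length : Int) + (k.natAbs : Int) - 2 := by
  unfold wIter
  split_ifs with hp he
  · omega
  · omega
  · have := mod_bounds (N := (code.length : Int)) (i - (k.natAbs : Int)) hN
    omega

lemma wIter_inj (code : List Int) {k : Int} (hN : 0 < (code.length : Int))
    {i i' : Int} (h0 : 0 ≤ i) (h1 : i < (code.length : Int))
    (h0' : 0 ≤ i') (h1' : i' < (code.length : Int))
    (h : wIter code k i = wIter code k i') : i = i' := by
  unfold wIter at h
  by_cases hp : 0 < k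
  · rw [if_pos hp, if_pos hp] at h
    split_ifs at h with e1 e2 <;> omega
  · rw [if_neg hp, if_neg hp] at h
    rw [PySem.Int.mod_eq_emod_of_pos hN, PySem.Int.mod_eq_emod_of_pos hN] at h
    have hmm : (i - (k.natAbs : Int)) % (code.length : Int)
        = (i' - (k.natAbs : Int)) % (code.length : Int) := by omega
    have hd := Int.ModEq.dvd (hmm : Int.ModEq (code.length : Int) _ _)
    have hd' : (code.length : Int) ∣ (i' - i) := by
      rwa [show (i' - (k.natAbs : Int)) - (i - (k.natAbs : Int)) = i' - i by ring] at hd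
    exact (eq_of_small_dvd hd' h0' h1' h0 h1).symm


-- ---- ansSpec machinery ----
lemma set_map_range (n : Nat) (g : Nat → Int) (j : Nat) (v : Int) (hj : j < n) :
    ((List.range n).map g).set j v = (List.range n).map (fun i => if i = j then v else g i) := by
  apply List.ext_getElem
  · simp
  · intro i hi hi'
    simp only [List.getElem_set, List.getElem_map, List.getElem_range]
    by_cases h : i = j
    · subst h; simp
    · rw [if_neg (Ne.symm h), if_neg h]

lemma ansSpec_stable (code : List Int) (k : Int) (hN : 0 < (code.length : Int)) (t : Int)
    (h : ∀ i : Int, 0 ≤ i → i < (code.length : Int) → wIter code k i ≠ t) :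
    ansSpec code k t = ansSpec code k (t + 1) := by
  unfold ansSpec
  apply List.map_congr_left
  intro i hi
  have hi' : (i : Int) < (code.length : Int) := by
    simp only [List.mem_range] at hi; exact_mod_cast hi
  have := h (i : Int) (by positivity) hi'
  by_cases hlt : wIter code k (i : Int) < t
  · rw [if_pos hlt, if_pos (by omega)]
  · rw [if_neg hlt, if_neg (by omega)]

lemma ansSpec_write (code : List Int) (k : Int) (hN : 0 < (code.length : Int)) (t i₀ : Int)
    (h0 : 0 ≤ i₀) (h1 : i₀ < (code.length : Int)) (hw : wIter code k i₀ = t) :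
    (ansSpec code k t).set i₀.toNat (Vval code k i₀) = ansSpec code k (t + 1) := by
  unfold ansSpec
  rw [set_map_range _ _ _ _ (by omega)]
  apply List.map_congr_left
  intro i hi
  have hi' : (i : Int) < (code.length : Int) := by
    simp only [List.mem_range] at hi; exact_mod_cast hi
  by_cases he : i = i₀.toNat
  · rw [if_pos he, if_pos (by rw [show (i : Int) = i₀ by omega]; omega)]
    congr 1; omega
  · rw [if_neg he]
    have hne : wIter code k (i : Int) ≠ t := by
      intro hc
      exact he (by have := wIter_inj code hN (by positivity) hi' h0 h1 (hc.trans hw.symm); omega)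
    by_cases hlt : wIter code k (i : Int) < t
    · rw [if_pos hlt, if_pos (by omega)]
    · rw [if_neg hlt, if_neg (by omega)]

-- ---- k = 0: the loop never touches ans ----
lemma stepA_zero_fst (code : List Int) (st : List Int × Int × Int) (r : Int) :
    (stepA code 0 st r).1 = st.1 := by
  unfold stepA
  dsimp only
  split_ifs <;> first | rfl | (exfalso; omega)

lemma foldl_zero_fst (code : List Int) (L : List Int) (st : List Int × Int × Int) :
    (L.foldl (stepA code 0) st).1 = st.1 := by
  induction L generalizing st with
  | nil => rfl
  | cons r L ih => rw [List.foldl_cons, ih, stepA_zero_fst]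



-- value identity used at the early write (window [0,m) lands at the wrap-around index)
lemma write_early_pos (code : List Int) {k : Int} (hp : 0 < k) (hN : 0 < (code.length : Int)) :
    Vval code k ((code.length : Int) - 1) = Ssum code 0 (k.natAbs : Int) := by
  rw [Vval_pos code hp]
  have h := Ssum_shift code 0 (k.natAbs : Int) 1 hN
  rw [show (0 : Int) + (1 : Nat) * (code.length : Int) = (code.length : Int) - 1 + 1 by push_cast; ring,
      show (k.natAbs : Int) + (1 : Nat) * (code.length : Int) = (code.length : Int) - 1 + 1 + (k.natAbs : Int) by push_cast; ring] at h
  exact h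

-- value identity at a write for k < 0: the written window equals B's window at i₀ = w % N
lemma write_neg_value (code : List Int) {k : Int} (hn : k < 0) (hN : 0 < (code.length : Int))
    {w : Int} (hw : 0 ≤ w) :
    Vval code k (PySem.Int.mod w (code.length : Int)) = Ssum code (w - (k.natAbs : Int)) w := by
  rw [Vval_neg code hn]
  have hi₀ : PySem.Int.mod w (code.length : Int) = w % (code.length : Int) :=
    PySem.Int.mod_eq_emod_of_pos hN
  have hdm := Int.emod_add_ediv w (code.length : Int)
  have hqnn : 0 ≤ w / (code.length : Int) := Int.ediv_nonneg hw (by omega)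
  have hqc : ((w / (code.length : Int)).toNat : Int) = w / (code.length : Int) :=
    Int.toNat_of_nonneg hqnn
  have h := Ssum_shift code (PySem.Int.mod w (code.length : Int) - (k.natAbs : Int))
      (PySem.Int.mod w (code.length : Int)) (w / (code.length : Int)).toNat hN
  have hmul : ((w / (code.length : Int)).toNat : Int) * (code.length : Int)
      = (code.length : Int) * (w / (code.length : Int)) := by rw [hqc]; ring
  rw [show PySem.Int.mod w (code.length : Int) - (k.natAbs : Int)
        + ((w / (code.length : Int)).toNat : Int) * (code.length : Int) = w - (k.natAbs : Int) by omega,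
      show PySem.Int.mod w (code.length : Int)
        + ((w / (code.length : Int)).toNat : Int) * (code.length : Int) = w by omega] at h
  exact h.symm

-- the unique write iteration of index w % N, for k < 0
lemma wIter_neg_mod (code : List Int) {k : Int} (hn : k < 0) (hN : 0 < (code.length : Int))
    (w : Int) :
    wIter code k (PySem.Int.mod w (code.length : Int))
      = (k.natAbs : Int) - 1 + PySem.Int.mod (w - (k.natAbs : Int)) (code.length : Int) := by
  unfold wIter
  rw [if_neg (by omega)]
  congr 1
  rw [PySem.Int.mod_eq_emod_of_pos hN, PySem.Int.mod_eq_emod_of_pos hN,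
      PySem.Int.mod_eq_emod_of_pos hN]
  conv_lhs => rw [Int.sub_emod]
  conv_rhs => rw [Int.sub_emod]
  rw [Int.emod_emod_of_dvd _ dvd_rfl]

lemma step_core (code : List Int) (k N m T : Int)
    (hNe : N = (code.length : Int)) (hme : m = (k.natAbs : Int)) (hk : k ≠ 0)
    (hN : 0 < N) (hT : 0 ≤ T) (ht : T < N + m) :
    stepA code k
      (ansSpec code k T, PySem.Int.mod (max 0 (T - m)) N, Ssum code (max 0 (T - m)) T) T
    = (ansSpec code k (T + 1), PySem.Int.mod (max 0 (T + 1 - m)) N,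
       Ssum code (max 0 (T + 1 - m)) (T + 1)) := by
  have hm1 : 1 ≤ m := by omega
  unfold stepA
  dsimp only
  rw [← hNe, ← hme]
  by_cases hTm : T < m
  · -- window still growing: no left-pointer move
    rw [show max 0 (T - m) = 0 by omega, show max 0 (T + 1 - m) = 0 by omega]
    have hm0 : PySem.Int.mod (0 : Int) N = 0 := mod_small le_rfl hN
    rw [hm0,
        if_neg (show ¬(T - 0 + 1 > m) by omega),
        if_neg (show ¬(T - 0 + 1 > m) by omega)]
    have hs : Ssum code 0 T + PySem.List.pyGetD code (PySem.Int.mod T N) 0 = Ssum code 0 (T + 1) := by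
      rw [hNe]; exact (Ssum_succ_right code hT).symm
    by_cases hT1 : T = m - 1
    · -- first full window: the early write
      rw [if_pos (show T - 0 + 1 = m by omega)]
      by_cases hp : 0 < k
      · rw [if_pos hp]
        have hwr : wIter code k (N - 1) = T := by
          unfold wIter
          rw [if_pos hp, if_pos (by omega : N - 1 = (code.length : Int) - 1)]
          omega
        have hset := ansSpec_write code k (hNe ▸ hN) T (N - 1) (by omega) (by omega) hwr
        rw [show PySem.Int.mod (0 - 1) N = N - 1 by
              rw [show (0 : Int) - 1 = -1 by ring]; exact mod_neg_one hN,
            hs, show Ssum code 0 (T + 1) = Vval code k (N - 1) by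
              rw [hNe, write_early_pos code hp (hNe ▸ hN)]; congr 1; omega,
            hset]
      · have hn : k < 0 := by omega
        rw [if_neg hp, if_pos hn]
        have hwr : wIter code k (PySem.Int.mod (T + 1) N) = T := by
          rw [hNe, wIter_neg_mod code hn (hNe ▸ hN), ← hNe, ← hme,
              show T + 1 - m = 0 by omega, hm0]
          omega
        have hb := mod_bounds (T + 1) hN
        have hset := ansSpec_write code k (hNe ▸ hN) T (PySem.Int.mod (T + 1) N)
          hb.1 (hNe ▸ hb.2) hwr
        rw [hs, show Ssum code 0 (T + 1) = Vval code k (PySem.Int.mod (T + 1) N) by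
              rw [hNe, write_neg_value code hn (hNe ▸ hN) (by omega : (0:Int) ≤ T + 1)]
              congr 1; omega]
        rw [hNe] at hset ⊢
        rw [hset]
    · -- no write yet
      rw [if_neg (show ¬(T - 0 + 1 = m) by omega), hs,
          ansSpec_stable code k (hNe ▸ hN) T (fun i h0 h1 => by
            have := wIter_bounds code (k := k) (hNe ▸ hN) h0 h1; omega)]
  · -- window full: pointer moves
    rw [show max 0 (T - m) = T - m by omega, show max 0 (T + 1 - m) = T + 1 - m by omega]
    have hms : PySem.Int.mod (T - m) N = T - m := mod_small (by omega) (by omega)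
    rw [hms,
        if_pos (show T - (T - m) + 1 > m by omega),
        if_pos (show T - (T - m) + 1 > m by omega)]
    have hs : Ssum code (T - m) T + PySem.List.pyGetD code (PySem.Int.mod T N) 0
        - PySem.List.pyGetD code (PySem.Int.mod (T - m) N) 0
        = Ssum code (T + 1 - m) (T + 1) := by
      have h1 : Ssum code (T - m) T = PySem.List.pyGetD code (PySem.Int.mod (T - m) N) 0
          + Ssum code (T - m + 1) T := by
        rw [hNe]; exact Ssum_cons code (show T - m < T by omega)
      have h2 : Ssum code (T - m + 1) (T + 1)
          = Ssum code (T - m + 1) T + PySem.List.pyGetD code (PySem.Int.mod T N) 0 := by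
        rw [hNe]; exact Ssum_succ_right code (by omega)
      rw [show T + 1 - m = T - m + 1 by ring, h2, h1]
      ring
    by_cases hlast : T + 1 - m < N
    · -- a write happens
      have hl1 : PySem.Int.mod (T - m + 1) N = T + 1 - m := by
        rw [show T - m + 1 = T + 1 - m by ring]; exact mod_small (by omega) hlast
      rw [hl1, if_pos (show T - (T + 1 - m) + 1 = m by ring)]
      by_cases hp : 0 < k
      · rw [if_pos hp]
        have hwr : wIter code k (T - m) = T := by
          unfold wIter
          rw [if_pos hp, if_neg (by omega : ¬(T - m = (code.length : Int) - 1))]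
          omega
        have hset := ansSpec_write code k (hNe ▸ hN) T (T - m) (by omega) (by omega) hwr
        rw [show PySem.Int.mod (T + 1 - m - 1) N = T - m by
              rw [show T + 1 - m - 1 = T - m by ring]; exact hms,
            hs, show Ssum code (T + 1 - m) (T + 1) = Vval code k (T - m) by
              rw [Vval_pos code hp]; congr 1 <;> omega,
            hset, show PySem.Int.mod (T + 1 - m) N = T + 1 - m from mod_small (by omega) hlast]
      · have hn : k < 0 := by omega
        rw [if_neg hp, if_pos hn]
        have hwr : wIter code k (PySem.Int.mod (T + 1) N) = T := by
          rw [hNe, wIter_neg_mod code hn (hNe ▸ hN), ← hNe, ← hme,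
              show PySem.Int.mod (T + 1 - m) N = T + 1 - m from mod_small (by omega) hlast]
          omega
        have hb := mod_bounds (T + 1) hN
        have hset := ansSpec_write code k (hNe ▸ hN) T (PySem.Int.mod (T + 1) N)
          hb.1 (hNe ▸ hb.2) hwr
        rw [hs, show Ssum code (T + 1 - m) (T + 1) = Vval code k (PySem.Int.mod (T + 1) N) by
              rw [hNe, write_neg_value code hn (hNe ▸ hN) (by omega : (0:Int) ≤ T + 1)]
              congr 1; omega]
        rw [hNe] at hset ⊢
        rw [hset, show PySem.Int.mod (T + 1 - m) (code.length : Int) = T + 1 - m from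
              mod_small (by omega) (hNe ▸ hlast)]
    · -- last iteration: pointer wraps to 0, no write
      have hl0 : PySem.Int.mod (T - m + 1) N = 0 := by
        rw [show T - m + 1 = N by omega, PySem.Int.mod_eq_emod_of_pos hN, Int.emod_self]
      rw [hl0, if_neg (show ¬(T - 0 + 1 = m) by omega), hs,
          show PySem.Int.mod (T + 1 - m) N = 0 by rw [show T + 1 - m = N by omega,
            PySem.Int.mod_eq_emod_of_pos hN, Int.emod_self],
          ansSpec_stable code k (hNe ▸ hN) T (fun i h0 h1 => by
            have := wIter_bounds code (k := k) (hNe ▸ hN) h0 h1; omega)]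


lemma loop_inv (code : List Int) (k : Int) (hN : 0 < (code.length : Int)) (hk : k ≠ 0)
    (t : Nat) (ht : t ≤ code.length + k.natAbs) :
    ((List.range t).map (fun x : Nat => (x : Int))).foldl (stepA code k)
        (List.replicate code.length 0, 0, 0)
    = (ansSpec code k (t : Int),
       PySem.Int.mod (max 0 ((t : Int) - (k.natAbs : Int))) (code.length : Int),
       Ssum code (max 0 ((t : Int) - (k.natAbs : Int))) (t : Int)) := by
  induction t with
  | zero =>
      simp only [List.range_zero, List.map_nil, List.foldl_nil, Nat.cast_zero]
      have hmax : max 0 ((0 : Int) - (k.natAbs : Int)) = 0 := by omega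
      rw [hmax, mod_small le_rfl hN, Ssum_nilr code le_rfl]
      refine congrArg (fun a => (a, (0 : Int), (0 : Int))) ?_
      have : ∀ i ∈ List.range code.length,
          (if wIter code k (i : Int) < (0 : Int) then Vval code k (i : Int) else 0) = (0 : Int) := by
        intro i hi
        have h1 : (i : Int) < (code.length : Int) := by
          simp only [List.mem_range] at hi; exact_mod_cast hi
        have := wIter_bounds code (k := k) hN (by positivity) h1
        rw [if_neg (by omega)]
      unfold ansSpec
      rw [List.map_congr_left this]
      simp [List.map_const']
  | succ t ih =>
      have ht' : t ≤ code.length + k.natAbs := by omega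
      rw [List.range_succ, List.map_append, List.foldl_append, ih ht']
      simp only [List.map_cons, List.map_nil, List.foldl_cons, List.foldl_nil]
      rw [step_core code k (code.length : Int) (k.natAbs : Int) (t : Int) rfl rfl hk hN
            (by positivity)
            (by have h2 : t < code.length + k.natAbs := by omega
                exact_mod_cast h2)]
      push_cast
      ring_nf

lemma ansSpec_final (code : List Int) (k : Int) (hN : 0 < (code.length : Int)) (hk : k ≠ 0) :
    ansSpec code k (((code.length + k.natAbs : Nat) : Int)) = decrypt_alt code k := by
  unfold ansSpec decrypt_alt
  have hall : ∀ i ∈ List.range code.length,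
      (if wIter code k (i : Int) < ((code.length + k.natAbs : Nat) : Int)
       then Vval code k (i : Int) else 0) = Vval code k (i : Int) := by
    intro i hi
    have h1 : (i : Int) < (code.length : Int) := by
      simp only [List.mem_range] at hi; exact_mod_cast hi
    have := wIter_bounds code (k := k) hN (by positivity) h1
    have h2 : ((code.length + k.natAbs : Nat) : Int) = (code.length : Int) + (k.natAbs : Int) := by
      push_cast; ring
    rw [if_pos (by rw [h2]; omega)]
  rw [List.map_congr_left hall]
  by_cases hp : 0 < k
  · rw [if_pos hp]
    apply List.map_congr_left
    intro i _
    rw [Vval, if_pos hp, PySem.List.foldl_add, zero_add]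
    rfl
  · rw [if_neg hp, if_pos (by omega : k < 0)]
    apply List.map_congr_left
    intro i _
    rw [Vval, if_neg hp, PySem.List.foldl_add, zero_add]
    rfl

theorem decrypt_spec : Claim_equal_decrypt := by
  intro code k _ hpre
  unfold Spec_decrypt
  by_cases hk : k = 0
  · subst hk
    unfold decrypt decrypt_alt
    rw [foldl_zero_fst]
    norm_num
  · have hne : code ≠ [] := by
      rcases hpre with h | h
      · exact h
      · exact absurd h hk
    have hN : 0 < (code.length : Int) := by
      have := List.length_pos_of_ne_nil hne
      exact_mod_cast this
    unfold decrypt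
    rw [show (code.length : Int) + (k.natAbs : Int) = ((code.length + k.natAbs : Nat) : Int) by
          push_cast; ring,
        PySem.List.pyRange_zero_natCast,
        loop_inv code k hN hk (code.length + k.natAbs) le_rfl]
    dsimp only
    rw [← ansSpec_final code k hN hk]
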